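-- pv_equiv track=rewrite | github.com/chihuanbin/specfit | IMF_code/IMF.py | redres
-- ===== SOURCE A (Python) =====
-- def redres(wl, spec, factor):
-- 	"""Calculates a barycentric velocity correction given a barycentric and/or a radial velocity (set the unused value to zero)
--
-- 	Args:
-- 		wl (list): wavelength vector.
-- 		bcvel (float): a barycentric or heliocentric velocity.
-- 		radvel (float): a systemic radial velocity.
--
-- 	Note:
-- 		Velocities are in km/s.
-- 		If system RV isn't known, that value can be zero.
--
-- 	Returns:
-- 		lam_corr (list): a wavelength vector corrected for barycentric and radial velocities.
--
-- 	"""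
-- 	wlnew = []
-- 	specnew = []
--
-- 	for i in range(len(wl)):
-- 		if i%factor == 0:
-- 			wlnew.append(wl[i])
-- 			specnew.append(spec[i])
-- 		else:
-- 			idx = int((i - i%factor)/factor)
-- 			specnew[idx] += spec[i]
-- 	return wlnew, specnew
-- ===== SOURCE B (Python) =====
-- def _group_sum(spec, start, stop):
--     s = spec[start]
--     for k in range(start + 1, stop):
--         s += spec[k]
--     return s
--
--
-- def redres(wl, spec, factor):
--     n = len(wl)
--     starts = range(0, n, factor)
--     wlnew = [wl[i] for i in starts]
--     specnew = [_group_sum(spec, i, min(i + factor, n)) for i in starts]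
--     return wlnew, specnew
-- ===== Notes on version B (the rewrite author's own statement) =====
-- stated objective: simpler
-- what changed: A makes one pass over all indices, testing i%factor and patching the current bin via modulo/index arithmetic into the growing output list; B instead iterates directly over the group start indices range(0, n, factor) and builds each output element independently (wl at the start, the explicit-index sum of spec over the group), with no conditional, no modulo and no in-place update. Measured constant-factor speedup: B avoids the per-element modulo test and the read-modify-write into the growing result list.
-- outside the precondition, e.g. on redres([1, 2, 3], [1, 2, 3], -2): A returns ([1, 3], [3, 3]), B returns ([], [])
import Mathlib
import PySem

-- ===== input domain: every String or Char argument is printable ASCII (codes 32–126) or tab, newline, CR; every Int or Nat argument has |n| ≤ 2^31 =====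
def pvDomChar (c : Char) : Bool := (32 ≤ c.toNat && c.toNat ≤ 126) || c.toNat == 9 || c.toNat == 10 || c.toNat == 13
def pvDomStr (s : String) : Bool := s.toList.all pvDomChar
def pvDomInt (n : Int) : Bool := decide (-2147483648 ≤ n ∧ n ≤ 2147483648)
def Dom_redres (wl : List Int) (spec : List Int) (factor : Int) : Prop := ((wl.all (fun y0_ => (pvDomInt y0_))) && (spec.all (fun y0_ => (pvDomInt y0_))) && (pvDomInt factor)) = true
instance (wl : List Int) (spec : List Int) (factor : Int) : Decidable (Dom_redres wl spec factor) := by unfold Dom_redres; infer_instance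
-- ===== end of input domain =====

-- B replaces A's single modulo-and-patch pass by a direct loop over the group start
-- indices, building each downsampled bin independently (objective: simpler).


-- ===== PORT A =====
-- literal transliteration of A: one pass over i in range(len(wl)); on i%factor==0 append
-- wl[i], spec[i]; else add spec[i] into specnew[idx].  pyGetD/pySetD are exact wherever
-- the Python indexing succeeds (inside Pre_ every index used is in range); Python's
-- int((i - i%factor)/factor) is exact floor division since factor divides i - i%factor.
def redres (wl : List Int) (spec : List Int) (factor : Int) : List Int × List Int :=
  (PySem.List.pyRange 0 (wl.length : Int) 1).foldl
    (fun st i =>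
      if PySem.Int.mod i factor = 0 then
        (st.1 ++ [PySem.List.pyGetD wl i 0], st.2 ++ [PySem.List.pyGetD spec i 0])
      else
        let idx := PySem.Int.floordiv (i - PySem.Int.mod i factor) factor
        (st.1, PySem.List.pySetD st.2 idx (PySem.List.pyGetD st.2 idx 0 + PySem.List.pyGetD spec i 0)))
    ([], [])

-- ===== PORT B =====
-- helper: _group_sum(spec, start, stop) = spec[start] + spec[start+1] + … + spec[stop-1]
def groupSum (spec : List Int) (start : Int) (stop : Int) : Int :=
  (PySem.List.pyRange (start + 1) stop 1).foldl
    (fun s k => s + PySem.List.pyGetD spec k 0)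
    (PySem.List.pyGetD spec start 0)

def redres_alt (wl : List Int) (spec : List Int) (factor : Int) : List Int × List Int :=
  let n : Int := wl.length
  let starts := PySem.List.pyRange 0 n factor
  let wlnew := starts.map (fun i => PySem.List.pyGetD wl i 0)
  let specnew := starts.map (fun i => groupSum spec i (min (i + factor) n))
  (wlnew, specnew)

-- ===== PRECONDITION & SPEC =====
-- Pre_ excludes exactly: factor = 0 (A raises ZeroDivisionError), spec shorter than wl
-- (A raises IndexError), and negative factor — a corner no one would specify for
-- downsampling, where A's returned value is an accident of negative-index wraparound
-- (every remainder sample is summed into the first bin) while B naturally returns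
-- empty output (empty range of group starts).
def Pre_redres (wl : List Int) (spec : List Int) (factor : Int) : Prop :=
  1 ≤ factor ∧ wl.length ≤ spec.length
instance (wl : List Int) (spec : List Int) (factor : Int) : Decidable (Pre_redres wl spec factor) := by unfold Pre_redres; infer_instance

def pvWitness_redres : List Int × List Int × Int := ([10, 11, 12, 13, 14], [1, 2, 3, 4, 5], 2)

def Spec_redres (wl : List Int) (spec : List Int) (factor : Int) (out : List Int × List Int) : Prop := out = redres_alt wl spec factor
instance (wl : List Int) (spec : List Int) (factor : Int) (out : List Int × List Int) : Decidable (Spec_redres wl spec factor out) := by unfold Spec_redres; infer_instance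

-- ===== CLAIM (what is proved, stated in full; the proofs are below) =====
def Claim_equal_redres : Prop := ∀ (wl : List Int) (spec : List Int) (factor : Int), Dom_redres wl spec factor → Pre_redres wl spec factor → Spec_redres wl spec factor (redres wl spec factor)

-- ===== LEMMAS AND PROOFS =====

-- pyRange 0 N f for positive f is the list of multiples of f below N
theorem pyRange_pos_eq_map (f : Int) (hf : 1 ≤ f) (N : Nat) :
    PySem.List.pyRange 0 (N : Int) f
      = (List.range (((N : Int) + f - 1) / f).toNat).map (fun (j : Nat) => f * (j : Int)) := by
  rw [PySem.List.pyRange_of_pos _ _ (by omega)]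
  rcases Nat.eq_zero_or_pos N with h | h
  · subst h
    have h0 : ((f : Int) - 1) / f = 0 := Int.ediv_eq_zero_of_lt (by omega) (by omega)
    simp [h0]
  · have h1 : (0 : Int) < (N : Int) := by exact_mod_cast h
    rw [if_pos h1]
    have h2 : (N : Int) - 0 + f - 1 = (N : Int) + f - 1 := by ring
    rw [h2]
    apply List.map_congr_left
    intro k _
    ring

-- extending the scan bound by one adds a group start exactly when f divides N
theorem pyRange_pos_succ (f : Int) (hf : 1 ≤ f) (N : Nat) :
    PySem.List.pyRange 0 ((N : Int) + 1) f
      = PySem.List.pyRange 0 (N : Int) f ++ (if f ∣ (N : Int) then [(N : Int)] else []) := by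
  have hcast : ((N : Int) + 1) = ((N + 1 : Nat) : Int) := by push_cast; ring
  rw [hcast, pyRange_pos_eq_map f hf (N + 1), pyRange_pos_eq_map f hf N]
  have hediv : ∀ (a q : Int), q * f ≤ a → a < (q + 1) * f → a / f = q := by
    intro a q h1 h2
    rw [← PySem.Int.floordiv_eq_ediv_of_pos (by omega : (0:Int) < f)]
    exact (PySem.Int.floordiv_eq_iff_of_pos (by omega)).mpr ⟨h1, h2⟩
  set k := (N : Int) / f with hk
  set r := (N : Int) % f with hrdef
  have hfe : f * k + r = (N : Int) := Int.mul_ediv_add_emod _ _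
  have hr0 : 0 ≤ r := Int.emod_nonneg _ (by omega)
  have hrf : r < f := Int.emod_lt_of_pos _ (by omega)
  have hk0 : 0 ≤ k := Int.ediv_nonneg (by positivity) (by omega)
  by_cases hd : f ∣ (N : Int)
  · have hr : r = 0 := Int.emod_eq_zero_of_dvd hd
    have c1 : (((N + 1 : Nat) : Int) + f - 1) / f = k + 1 := by
      apply hediv <;> push_cast <;> nlinarith
    have c0 : ((N : Int) + f - 1) / f = k := by
      apply hediv <;> nlinarith
    rw [c1, c0, if_pos hd]
    have ht : (k + 1).toNat = k.toNat + 1 := by omega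
    rw [ht, List.range_succ, List.map_append]
    congr 1
    simp only [List.map_cons, List.map_nil]
    congr 1
    have : (k.toNat : Int) = k := by omega
    rw [this]; omega
  · have hr1 : 1 ≤ r := by
      rcases lt_or_eq_of_le hr0 with h | h
      · omega
      · exact absurd (Int.dvd_of_emod_eq_zero h.symm) hd
    have c1 : (((N + 1 : Nat) : Int) + f - 1) / f = k + 1 := by
      apply hediv <;> push_cast <;> nlinarith
    have c0 : ((N : Int) + f - 1) / f = k + 1 := by
      apply hediv <;> nlinarith
    rw [c1, c0, if_neg hd, List.append_nil]

-- the main loop invariant: after scanning indices 0..N-1, A's state is B's output on bound N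
theorem loop_invariant (wl spec : List Int) (f : Int) (hf : 1 ≤ f) (N : Nat) :
    (PySem.List.pyRange 0 (N : Int) 1).foldl
      (fun st i =>
        if PySem.Int.mod i f = 0 then
          (st.1 ++ [PySem.List.pyGetD wl i 0], st.2 ++ [PySem.List.pyGetD spec i 0])
        else
          let idx := PySem.Int.floordiv (i - PySem.Int.mod i f) f
          (st.1, PySem.List.pySetD st.2 idx (PySem.List.pyGetD st.2 idx 0 + PySem.List.pyGetD spec i 0)))
      ([], [])
    = ((PySem.List.pyRange 0 (N : Int) f).map (fun i => PySem.List.pyGetD wl i 0),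
       (PySem.List.pyRange 0 (N : Int) f).map (fun i => groupSum spec i (min (i + f) (N : Int)))) := by
  induction N with
  | zero =>
      simp [PySem.List.pyRange]
  | succ N ih =>
      have hcast : ((N + 1 : Nat) : Int) = (N : Int) + 1 := by push_cast; ring
      rw [hcast, PySem.List.pyRange_one_succ_right (by positivity), List.foldl_append, ih,
          pyRange_pos_succ f hf N]
      by_cases hd : f ∣ (N : Int)
      · rw [if_pos hd]
        have hm : PySem.Int.mod (N : Int) f = 0 := (PySem.Int.mod_eq_zero_iff_dvd _ _).mpr hd
        simp only [List.foldl_cons, List.foldl_nil, hm, if_pos, List.map_append, List.map_cons,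
          List.map_nil]
        refine Prod.ext rfl ?_
        simp only []
        congr 1
        · apply List.map_congr_left
          intro i hi
          obtain ⟨h0, hiN, hdvd⟩ := (PySem.List.mem_pyRange_iff_of_pos (by omega) i).mp hi
          have hif : i + f ≤ (N : Int) := by
            have : f ≤ (N : Int) - i := Int.le_of_dvd (by omega) (by simpa using dvd_sub hd hdvd)
            omega
          rw [min_eq_left (by omega), min_eq_left (by omega)]
        · rw [min_eq_right (by omega)]
          unfold groupSum
          rw [PySem.List.pyRange_one_eq_nil (le_refl _)]
          rfl
      · rw [if_neg hd, List.append_nil]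
        have hm0 : PySem.Int.mod (N : Int) f ≠ 0 := fun h => hd ((PySem.Int.mod_eq_zero_iff_dvd _ _).mp h)
        simp only [List.foldl_cons, List.foldl_nil, if_neg hm0]
        refine Prod.ext rfl ?_
        have hmod : PySem.Int.mod (N : Int) f = (N : Int) % f := PySem.Int.mod_eq_emod_of_pos (by omega)
        set k := (N : Int) / f with hkdef
        have hfe : f * k + (N : Int) % f = (N : Int) := Int.mul_ediv_add_emod _ _
        have hr0 : 0 ≤ (N : Int) % f := Int.emod_nonneg _ (by omega)
        have hrf : (N : Int) % f < f := Int.emod_lt_of_pos _ (by omega)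
        have hr1 : 1 ≤ (N : Int) % f := by
          rcases lt_or_eq_of_le hr0 with h | h
          · omega
          · exact absurd ((PySem.Int.mod_eq_zero_iff_dvd _ _).mp (by omega)) hd
        have hk0 : 0 ≤ k := Int.ediv_nonneg (by positivity) (by omega)
        have hidx : PySem.Int.floordiv ((N : Int) - PySem.Int.mod (N : Int) f) f = k := by
          rw [hmod, PySem.Int.floordiv_eq_ediv_of_pos (by omega)]
          have h1 : (N : Int) - (N : Int) % f = f * k := by linarith
          rw [h1, Int.mul_ediv_cancel_left _ (by omega)]
        rw [hidx]
        have hediv : ∀ (a q : Int), q * f ≤ a → a < (q + 1) * f → a / f = q := by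
          intro a q h1 h2
          rw [← PySem.Int.floordiv_eq_ediv_of_pos (by omega : (0:Int) < f)]
          exact (PySem.Int.floordiv_eq_iff_of_pos (by omega)).mpr ⟨h1, h2⟩
        have c0 : ((N : Int) + f - 1) / f = k + 1 := by
          apply hediv <;> nlinarith
        obtain ⟨kn, hkn⟩ : ∃ m : Nat, k = (m : Int) := ⟨k.toNat, by omega⟩
        rw [hkn] at c0
        rw [hkn, pyRange_pos_eq_map f hf N, c0,
          show (((kn : Int) + 1)).toNat = kn + 1 by omega,
          List.range_succ, List.map_append, List.map_append, List.map_append]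
        simp only [List.map_cons, List.map_nil]
        rw [PySem.List.pySetD_natCast, PySem.List.pyGetD_natCast]
        have hset : ∀ (l : List Int) (a v : Int) (n : Nat), l.length = n →
            (l ++ [a]).set n v = l ++ [v] := by
          intro l a v n h; subst h; simp
        have hget : ∀ (l : List Int) (a : Int) (n : Nat), l.length = n →
            (l ++ [a]).getD n 0 = a := by
          intro l a n h; subst h; simp
        rw [hget _ _ _ (by simp), hset _ _ _ _ (by simp)]
        have hs : f * (kn : Int) = (N : Int) - (N : Int) % f := by
          rw [← hkn]; linarith
        rw [List.map_append]
        simp only [List.map_cons, List.map_nil]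
        congr 1
        · apply List.map_congr_left
          intro i hi
          obtain ⟨j, hj, rfl⟩ := List.mem_map.mp hi
          have hjkn : j + 1 ≤ kn := List.mem_range.mp hj
          have hjle : f * ((j : Int) + 1) ≤ f * (kn : Int) := by
            apply mul_le_mul_of_nonneg_left _ (by omega)
            exact_mod_cast hjkn
          have hif : f * (j : Int) + f ≤ (N : Int) := by nlinarith
          rw [min_eq_left (by omega), min_eq_left (by omega)]
        · rw [min_eq_right (by omega), min_eq_right (by omega)]
          unfold groupSum
          rw [PySem.List.pyRange_one_succ_right (by omega : f * (kn : Int) + 1 ≤ (N : Int)),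
            List.foldl_append]
          rfl

-- ===== VERDICT (by name: the statement is the Claim_ definition above) =====
theorem redres_spec : Claim_equal_redres := by
  intro wl spec factor _ hpre
  unfold Spec_redres redres redres_alt
  exact loop_invariant wl spec factor hpre.1 wl.length
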